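-- pv_equiv track=rewrite | github.com/Kudito98/Codesignal-tasks | intro/52-longestWord/longestWord.py | solution
-- ===== SOURCE A (Python) =====
-- def solution(text):
--     words = ""
--     for i in text:
--         if i.isalpha() or i == " ":
--             words += i
--         else:
--             words += " "
--     lstwords = words.split(" ")
--     mlen = ""
--     for i in lstwords:
--         if len(i) > len(mlen):
--             mlen = i
--     return mlen
-- ===== SOURCE B (Python) =====
-- def solution(text):
--     best = ""
--     cur = ""
--     for c in text:
--         if c.isalpha():
--             cur += c
--         else:
--             if len(cur) > len(best):
--                 best = cur
--             cur = ""
--     if len(cur) > len(best):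
--         best = cur
--     return best
-- ===== Notes on version B (the rewrite author's own statement) =====
-- stated objective: simpler
-- what changed: Single streaming pass tracking the current alphabetic run and the best-so-far, instead of building a masked copy of the text, splitting it on spaces and scanning the word list in a second loop.
import Mathlib
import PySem

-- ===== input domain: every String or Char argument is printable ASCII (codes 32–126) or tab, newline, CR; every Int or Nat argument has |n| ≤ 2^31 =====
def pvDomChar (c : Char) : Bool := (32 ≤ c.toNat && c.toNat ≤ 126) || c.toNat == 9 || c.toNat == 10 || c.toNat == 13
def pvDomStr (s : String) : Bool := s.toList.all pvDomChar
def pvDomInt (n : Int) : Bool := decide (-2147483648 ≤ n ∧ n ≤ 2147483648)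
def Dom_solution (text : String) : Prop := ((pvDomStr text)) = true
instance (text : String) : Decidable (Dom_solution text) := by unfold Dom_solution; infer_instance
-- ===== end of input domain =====

-- B replaces A's mask/split/second-scan pipeline by one streaming pass (simpler).

-- ===== PORT A =====
def solution (text : String) : String :=
  let words : List Char :=
    text.toList.foldl (fun w i => if PySem.Chars.isalpha i || i == ' ' then w ++ [i] else w ++ [' ']) []
  let lstwords := PySem.Chars.splitOn words [' ']
  let mlen := lstwords.foldl (fun m i => if i.length > m.length then i else m) []
  String.ofList mlen

-- ===== PORT B =====
def solution_alt (text : String) : String :=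
  let s :=
    text.toList.foldl
      (fun (st : List Char × List Char) c =>
        if PySem.Chars.isalpha c then (st.1 ++ [c], st.2)
        else ([], if st.1.length > st.2.length then st.1 else st.2))
      ([], [])
  String.ofList (if s.1.length > s.2.length then s.1 else s.2)

-- ===== PRECONDITION & SPEC =====
def Spec_solution (text : String) (out : String) : Prop := out = solution_alt text
instance (text : String) (out : String) : Decidable (Spec_solution text out) := by unfold Spec_solution; infer_instance

-- ===== CLAIM (what is proved, stated in full; the proofs are below) =====
def Claim_equal_solution : Prop := ∀ (text : String), Dom_solution text → Spec_solution text (solution text)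

-- ===== LEMMAS AND PROOFS =====

-- the character A's first loop writes for c
def pvMask (c : Char) : Char := if PySem.Chars.isalpha c || c == ' ' then c else ' '

-- specification of splitOn on the single-space separator
def pvSplit : List Char → List (List Char)
  | [] => [[]]
  | c :: l => if c = ' ' then [] :: pvSplit l else (pvSplit l).modifyHead (c :: ·)

theorem pvSplit_ne_nil (l : List Char) : pvSplit l ≠ [] := by
  induction l with
  | nil => simp [pvSplit]
  | cons c l ih =>
    simp only [pvSplit]
    split
    · simp
    · cases h : pvSplit l with
      | nil => exact absurd h ih
      | cons a t => simp [List.modifyHead]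

theorem pvMaskFold (l : List Char) (w : List Char) :
    l.foldl (fun w i => if PySem.Chars.isalpha i || i == ' ' then w ++ [i] else w ++ [' ']) w
      = w ++ l.map pvMask := by
  induction l generalizing w with
  | nil => simp
  | cons c l ih =>
    rw [List.foldl_cons, List.map_cons, ih]
    by_cases hc : (PySem.Chars.isalpha c || c == ' ') = true <;> simp [pvMask, hc]

theorem pvGo (fuel : Nat) :
    ∀ (l cur : List Char) (acc : List (List Char)), l.length < fuel →
    PySem.Chars.splitOn.go [' '] fuel l cur acc
      = acc.reverse ++ (pvSplit l).modifyHead (cur.reverse ++ ·) := by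
  induction fuel with
  | zero => intro l cur acc h; omega
  | succ fuel ih =>
    intro l cur acc h
    cases l with
    | nil =>
      rw [PySem.Chars.splitOn.go]
      · simp [pvSplit, List.modifyHead]
      · simp
    | cons c rest =>
      rw [PySem.Chars.splitOn.go]
      by_cases hc : c = ' '
      · subst hc
        simp only [List.isPrefixOf, BEq.rfl, Bool.true_and, if_pos]
        rw [show List.drop [' '].length (' ' :: rest) = rest from rfl]
        rw [ih rest [] _ (by simpa using Nat.lt_of_succ_lt_succ h)]
        cases hs : pvSplit rest with
        | nil => exact absurd hs (pvSplit_ne_nil rest)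
        | cons a t => simp [pvSplit, hs, List.modifyHead]
      · have hpre : [' '].isPrefixOf (c :: rest) = false := by
          simp [List.isPrefixOf]; exact fun hh => absurd hh.symm hc
        rw [hpre]
        simp only [Bool.false_eq_true, if_false]
        rw [ih rest (c :: cur) acc (by simpa using Nat.lt_of_succ_lt_succ h)]
        simp only [pvSplit, if_neg hc, List.reverse_cons]
        congr 1
        cases hs : pvSplit rest with
        | nil => exact absurd hs (pvSplit_ne_nil rest)
        | cons a t => simp [List.modifyHead]

theorem pvSplitOn_eq (l : List Char) : PySem.Chars.splitOn l [' '] = pvSplit l := by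
  unfold PySem.Chars.splitOn
  rw [pvGo (l.length + 1) l [] [] (by omega)]
  cases hs : pvSplit l with
  | nil => exact absurd hs (pvSplit_ne_nil l)
  | cons a t => simp [List.modifyHead]

theorem pvPickLoop (l : List Char) : ∀ (cur best : List Char),
    (let s := l.foldl
        (fun (st : List Char × List Char) c =>
          if PySem.Chars.isalpha c then (st.1 ++ [c], st.2)
          else ([], if st.1.length > st.2.length then st.1 else st.2))
        (cur, best);
      if s.1.length > s.2.length then s.1 else s.2)
      = ((pvSplit (l.map pvMask)).modifyHead (cur ++ ·)).foldl
          (fun m i => if i.length > m.length then i else m) best := by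
  induction l with
  | nil => intro cur best; simp [pvSplit, List.modifyHead]
  | cons c l ih =>
    intro cur best
    by_cases hc : PySem.Chars.isalpha c = true
    · have hcsp : c ≠ ' ' := by
        intro hh; rw [hh] at hc; exact absurd hc (by decide)
      have hm : pvMask c = c := by simp [pvMask, hc]
      simp only [List.foldl_cons, List.map_cons, hm, if_pos hc]
      rw [ih (cur ++ [c]) best]
      simp only [pvSplit, if_neg hcsp]
      congr 1
      cases hs : pvSplit (l.map pvMask) with
      | nil => exact absurd hs (pvSplit_ne_nil _)
      | cons a t => simp [List.modifyHead]
    · have hm : pvMask c = ' ' := by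
        simp only [pvMask]
        by_cases hsp : c = ' ' <;> simp [hc, hsp]
      simp only [List.foldl_cons, List.map_cons, hm, if_neg hc]
      rw [ih [] (if cur.length > best.length then cur else best)]
      simp only [pvSplit]
      cases hs : pvSplit (l.map pvMask) with
      | nil => exact absurd hs (pvSplit_ne_nil _)
      | cons a t => simp

-- ===== VERDICT (by name: the statement is the Claim_ definition above) =====
theorem solution_spec : Claim_equal_solution := by
  intro text _
  unfold Spec_solution solution solution_alt
  have h := pvPickLoop text.toList [] []
  simp only [] at h ⊢
  rw [pvMaskFold, pvSplitOn_eq, List.nil_append, h]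
  cases hs : pvSplit (text.toList.map pvMask) with
  | nil => exact absurd hs (pvSplit_ne_nil _)
  | cons a t => simp [List.modifyHead]
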